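-- pv_equiv track=rewrite | github.com/kamilGie/WDI | Kolokwia/Kolokwium_2/2022_B4/Rozwiązania/main.py | wszystkie_szachowane
-- ===== SOURCE A (Python) =====
-- def wszystkie_szachowane(T):
--     """Sprawdza, czy wszystkie pola na szachownicy T są szachowane."""
--     # Tworzę tablicę szachowania przechowującą, czy pole jest szachowane.
--     N = len(T)
--     szachowane = []
--     for i in range(N):
--         szachowane.append([False] * N)
--
--     # Sprawdź, które pola są szachowane przez wieże.
--     for i in range(N):
--         for j in range(N):
--             if T[i][j]:  # Jeśli jest wieża w tym miejscu.
--                 for k in range(N):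
--                     szachowane[i][k] = True  # Cały wiersz.
--                     szachowane[k][j] = True  # Cała kolumna.
--
--     # Sprawdź, czy wszystkie pola są szachowane.
--     for i in range(N):
--         for j in range(N):
--             if not szachowane[i][j]:  # Jeśli pole nie jest szachowane.
--                 return False
--     return True
-- ===== SOURCE B (Python) =====
-- def wszystkie_szachowane(T):
--     """Sprawdza, czy wszystkie pola na szachownicy T sa szachowane."""
--     # All squares are attacked iff every row has a rook or every column has a rook.
--     N = len(T)
--     row_ok = all(any(T[i][j] for j in range(N)) for i in range(N))
--     col_ok = all(any(T[i][j] for i in range(N)) for j in range(N))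
--     return row_ok or col_ok
-- ===== Notes on version B (the rewrite author's own statement) =====
-- stated objective: faster
-- what changed: Instead of filling an N x N 'attacked' matrix in a triple loop and then scanning it, B computes row/column rook occupancy directly, using that all squares are attacked iff every row has a rook or every column has a rook.
import Mathlib
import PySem

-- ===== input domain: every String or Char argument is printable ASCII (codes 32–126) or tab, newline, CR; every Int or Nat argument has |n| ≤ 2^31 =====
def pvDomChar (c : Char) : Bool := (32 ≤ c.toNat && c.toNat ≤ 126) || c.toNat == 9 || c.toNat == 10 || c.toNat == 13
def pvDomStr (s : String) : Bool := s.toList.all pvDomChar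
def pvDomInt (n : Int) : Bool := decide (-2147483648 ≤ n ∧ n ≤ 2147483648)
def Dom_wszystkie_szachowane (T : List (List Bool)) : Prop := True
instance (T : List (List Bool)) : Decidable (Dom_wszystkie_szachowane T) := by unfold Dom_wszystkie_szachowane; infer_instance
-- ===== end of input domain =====

-- B replaces A's O(N^3) marking-matrix construction by a direct row/column occupancy check
-- (all squares attacked iff every row has a rook or every column has a rook); objective: faster.

-- ===== PORT A =====
-- szachowane[a][b]  (out-of-range reads default to false/[]; Pre_ keeps the Python in range)
def pvMget (M : List (List Bool)) (a b : Nat) : Bool := (M.getD a []).getD b false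
-- szachowane[a][b] = True
def pvMset (M : List (List Bool)) (a b : Nat) : List (List Bool) :=
  M.set a ((M.getD a []).set b true)
-- the inner 'for k in range(N)' loop of A
def pvMarkK (N : Nat) (i j : Nat) (M : List (List Bool)) : List (List Bool) :=
  (List.range N).foldl (fun M k => pvMset (pvMset M i k) k j) M
-- 'for j in range(N): if T[i][j]: …'
def pvMarkJ (T : List (List Bool)) (i : Nat) (M : List (List Bool)) : List (List Bool) :=
  (List.range T.length).foldl
    (fun M j => if (T.getD i []).getD j false then pvMarkK T.length i j M else M) M
-- 'for i in range(N): …'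
def pvMarkI (T : List (List Bool)) (M : List (List Bool)) : List (List Bool) :=
  (List.range T.length).foldl (fun M i => pvMarkJ T i M) M
-- building 'szachowane' by appending rows of False
def pvInit (T : List (List Bool)) : List (List Bool) :=
  (List.range T.length).foldl (fun acc _ => acc ++ [List.replicate T.length false]) []

def wszystkie_szachowane (T : List (List Bool)) : Bool :=
  let N := T.length
  let sz := pvMarkI T (pvInit T)
  -- the final double loop with early 'return False'
  (List.range N).all (fun i => (List.range N).all (fun j => pvMget sz i j))

-- ===== PORT B =====
def wszystkie_szachowane_alt (T : List (List Bool)) : Bool :=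
  let N := T.length
  let row_ok := (List.range N).all (fun i => (List.range N).any (fun j => (T.getD i []).getD j false))
  let col_ok := (List.range N).all (fun j => (List.range N).any (fun i => (T.getD i []).getD j false))
  row_ok || col_ok

-- ===== PRECONDITION & SPEC =====
-- Pre_ excludes only ragged boards with a row shorter than len(T): there Python A raises IndexError.
def Pre_wszystkie_szachowane (T : List (List Bool)) : Prop :=
  ∀ row ∈ T, T.length ≤ row.length
instance (T : List (List Bool)) : Decidable (Pre_wszystkie_szachowane T) := by
  unfold Pre_wszystkie_szachowane; infer_instance

def pvWitness_wszystkie_szachowane : List (List Bool) := [[true, false], [false, true]]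

def Spec_wszystkie_szachowane (T : List (List Bool)) (out : Bool) : Prop := out = wszystkie_szachowane_alt T
instance (T : List (List Bool)) (out : Bool) : Decidable (Spec_wszystkie_szachowane T out) := by unfold Spec_wszystkie_szachowane; infer_instance

-- ===== CLAIM (what is proved, stated in full; the proofs are below) =====
def Claim_equal_wszystkie_szachowane : Prop := ∀ (T : List (List Bool)), Dom_wszystkie_szachowane T → Pre_wszystkie_szachowane T → Spec_wszystkie_szachowane T (wszystkie_szachowane T)

-- ===== LEMMAS AND PROOFS =====

-- shape invariant of the marking matrix: N rows, each of length N
def pvShape (N : Nat) (M : List (List Bool)) : Prop :=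
  M.length = N ∧ ∀ a < N, (M.getD a []).length = N

theorem pv_getD_set_eq {α : Type} (l : List α) (i : Nat) (x d : α) (h : i < l.length) :
    (l.set i x).getD i d = x := by
  simp [List.getD, h]

theorem pv_getD_set_ne {α : Type} (l : List α) (i j : Nat) (x d : α) (h : i ≠ j) :
    (l.set i x).getD j d = l.getD j d := by
  simp [List.getD, h]

theorem pvShape_mset {N : Nat} {M : List (List Bool)} (hs : pvShape N M) (i j : Nat) :
    pvShape N (pvMset M i j) := by
  obtain ⟨h1, h2⟩ := hs
  refine ⟨by simp [pvMset, h1], ?_⟩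
  intro a ha
  by_cases hai : a = i
  · subst hai
    by_cases hiN : a < M.length
    · rw [pvMset, pv_getD_set_eq _ _ _ _ hiN]
      simpa using h2 a ha
    · simp [pvMset, List.set_eq_of_length_le (by omega)]
      exact h2 a ha
  · rw [pvMset, pv_getD_set_ne _ _ _ _ _ (Ne.symm hai)]
    exact h2 a ha

theorem pvMget_mset {N : Nat} {M : List (List Bool)} (hs : pvShape N M)
    {i j : Nat} (hi : i < N) (hj : j < N) (a b : Nat) :
    pvMget (pvMset M i j) a b = if a = i ∧ b = j then true else pvMget M a b := by
  obtain ⟨h1, h2⟩ := hs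
  have hiM : i < M.length := by omega
  by_cases hai : a = i
  · subst hai
    rw [pvMget, pvMset, pv_getD_set_eq _ _ _ _ hiM]
    by_cases hbj : b = j
    · subst hbj
      rw [pv_getD_set_eq _ _ _ _ (by rw [h2 a hi]; exact hj)]
      simp
    · rw [pv_getD_set_ne _ _ _ _ _ (Ne.symm hbj)]
      simp [hbj, pvMget]
  · rw [pvMget, pvMset, pv_getD_set_ne _ _ _ _ _ (Ne.symm hai)]
    simp [hai, pvMget]

theorem pvShape_markK {N : Nat} {M : List (List Bool)} (hs : pvShape N M)
    {i j : Nat} (hi : i < N) (hj : j < N) (n : Nat) (hn : n ≤ N) :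
    pvShape N ((List.range n).foldl (fun M k => pvMset (pvMset M i k) k j) M) := by
  induction n with
  | zero => simpa using hs
  | succ m ih =>
    rw [List.range_succ, List.foldl_append]
    exact pvShape_mset (pvShape_mset (ih (by omega)) i m) m j

theorem pvMget_markK {N : Nat} {M : List (List Bool)} (hs : pvShape N M)
    {i j : Nat} (hi : i < N) (hj : j < N) (n : Nat) (hn : n ≤ N) (a b : Nat) :
    pvMget ((List.range n).foldl (fun M k => pvMset (pvMset M i k) k j) M) a b
      = if (a = i ∧ b < n) ∨ (a < n ∧ b = j) then true else pvMget M a b := by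
  induction n with
  | zero => simp
  | succ m ih =>
    rw [List.range_succ, List.foldl_append]
    simp only [List.foldl_cons, List.foldl_nil]
    have hsm := pvShape_markK hs hi hj m (by omega)
    have hsm2 := pvShape_mset hsm i m
    rw [pvMget_mset hsm2 (by omega) hj a b,
        pvMget_mset hsm hi (by omega) a b, ih (by omega)]
    have hc : ∀ (P Q R : Prop) [Decidable P] [Decidable Q] [Decidable R] (x : Bool),
        (if P then true else if Q then true else if R then true else x)
          = (if P ∨ Q ∨ R then true else x) := by
      intros P Q R _ _ _ x; split_ifs <;> tauto
    rw [hc]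
    refine if_congr ?_ rfl rfl
    omega

theorem pvShape_markJ_aux {T : List (List Bool)} {M : List (List Bool)}
    (hs : pvShape T.length M) {i : Nat} (hi : i < T.length) (n : Nat) (hn : n ≤ T.length) :
    pvShape T.length ((List.range n).foldl
      (fun M j => if (T.getD i []).getD j false then pvMarkK T.length i j M else M) M) := by
  induction n with
  | zero => simpa using hs
  | succ m ih =>
    rw [List.range_succ, List.foldl_append]
    simp only [List.foldl_cons, List.foldl_nil]
    split_ifs
    · exact pvShape_markK (ih (by omega)) hi (by omega) T.length (le_refl _)
    · exact ih (by omega)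

theorem pvMget_markJ_aux {T : List (List Bool)} {M : List (List Bool)}
    (hs : pvShape T.length M) {i : Nat} (hi : i < T.length)
    {a b : Nat} (ha : a < T.length) (hb : b < T.length) (n : Nat) (hn : n ≤ T.length) :
    pvMget ((List.range n).foldl
      (fun M j => if (T.getD i []).getD j false then pvMarkK T.length i j M else M) M) a b
      = if (a = i ∧ ∃ j < n, (T.getD i []).getD j false = true)
          ∨ (b < n ∧ (T.getD i []).getD b false = true)
        then true else pvMget M a b := by
  induction n with
  | zero => simp
  | succ m ih =>
    rw [List.range_succ, List.foldl_append]
    simp only [List.foldl_cons, List.foldl_nil]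
    have hsm := pvShape_markJ_aux hs hi m (by omega)
    by_cases htm : (T.getD i []).getD m false = true
    · rw [if_pos htm, pvMarkK,
        pvMget_markK hsm hi (by omega : m < T.length) T.length (le_refl _) a b,
        ih (by omega)]
      have hc : ∀ (P Q : Prop) [Decidable P] [Decidable Q] (x : Bool),
          (if P then true else if Q then true else x) = (if P ∨ Q then true else x) := by
        intros P Q _ _ x; split_ifs <;> tauto
      rw [hc]
      refine if_congr ?_ rfl rfl
      constructor
      · rintro ((⟨hai, _⟩ | ⟨_, hbm⟩) | (⟨hai, j, hj, hgj⟩ | ⟨hb', hgb⟩))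
        · exact Or.inl ⟨hai, m, by omega, htm⟩
        · exact Or.inr ⟨by omega, by rwa [hbm]⟩
        · exact Or.inl ⟨hai, j, by omega, hgj⟩
        · exact Or.inr ⟨by omega, hgb⟩
      · rintro (⟨hai, j, hj, hgj⟩ | ⟨hb', hgb⟩)
        · exact Or.inl (Or.inl ⟨hai, by omega⟩)
        · by_cases hbm : b = m
          · exact Or.inl (Or.inr ⟨by omega, hbm⟩)
          · exact Or.inr (Or.inr ⟨by omega, hgb⟩)
    · rw [if_neg htm, ih (by omega)]
      refine if_congr ?_ rfl rfl
      constructor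
      · rintro (⟨hai, j, hj, hgj⟩ | ⟨hb', hgb⟩)
        · exact Or.inl ⟨hai, j, by omega, hgj⟩
        · exact Or.inr ⟨by omega, hgb⟩
      · rintro (⟨hai, j, hj, hgj⟩ | ⟨hb', hgb⟩)
        · refine Or.inl ⟨hai, j, ?_, hgj⟩
          rcases Nat.lt_succ_iff_lt_or_eq.mp hj with h' | h'
          · exact h'
          · exact absurd (h' ▸ hgj) htm
        · refine Or.inr ⟨?_, hgb⟩
          rcases Nat.lt_succ_iff_lt_or_eq.mp hb' with h' | h'
          · exact h'
          · exact absurd (h' ▸ hgb) htm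

theorem pvShape_markJ {T : List (List Bool)} {M : List (List Bool)}
    (hs : pvShape T.length M) {i : Nat} (hi : i < T.length) :
    pvShape T.length (pvMarkJ T i M) :=
  pvShape_markJ_aux hs hi T.length (le_refl _)

theorem pvMget_markJ {T : List (List Bool)} {M : List (List Bool)}
    (hs : pvShape T.length M) {i : Nat} (hi : i < T.length)
    {a b : Nat} (ha : a < T.length) (hb : b < T.length) :
    pvMget (pvMarkJ T i M) a b
      = if (a = i ∧ ∃ j < T.length, (T.getD i []).getD j false = true)
          ∨ (T.getD i []).getD b false = true
        then true else pvMget M a b := by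
  rw [pvMarkJ, pvMget_markJ_aux hs hi ha hb T.length (le_refl _)]
  refine if_congr ?_ rfl rfl
  constructor
  · rintro (h | ⟨_, h⟩)
    · exact Or.inl h
    · exact Or.inr h
  · rintro (h | h)
    · exact Or.inl h
    · exact Or.inr ⟨hb, h⟩

theorem pvMget_markI_aux {T : List (List Bool)} {M : List (List Bool)}
    (hs : pvShape T.length M) {a b : Nat} (ha : a < T.length) (hb : b < T.length)
    (n : Nat) (hn : n ≤ T.length) :
    pvMget ((List.range n).foldl (fun M i => pvMarkJ T i M) M) a b
      = if (a < n ∧ ∃ j < T.length, (T.getD a []).getD j false = true)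
          ∨ (∃ i < n, (T.getD i []).getD b false = true)
        then true else pvMget M a b := by
  induction n with
  | zero => simp
  | succ m ih =>
    rw [List.range_succ, List.foldl_append]
    simp only [List.foldl_cons, List.foldl_nil]
    have hsm : pvShape T.length ((List.range m).foldl (fun M i => pvMarkJ T i M) M) := by
      clear ih
      induction m with
      | zero => simpa using hs
      | succ k ihk =>
        rw [List.range_succ, List.foldl_append]
        simp only [List.foldl_cons, List.foldl_nil]
        exact pvShape_markJ (ihk (by omega)) (by omega)
    rw [pvMget_markJ hsm (by omega : m < T.length) ha hb, ih (by omega)]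
    have hc : ∀ (P Q : Prop) [Decidable P] [Decidable Q] (x : Bool),
        (if P then true else if Q then true else x) = (if P ∨ Q then true else x) := by
      intros P Q _ _ x; split_ifs <;> tauto
    rw [hc]
    refine if_congr ?_ rfl rfl
    constructor
    · rintro ((⟨ham, hr⟩ | hcb) | (⟨ha', hr⟩ | ⟨i, hi', hcb⟩))
      · exact Or.inl ⟨by omega, ham ▸ hr⟩
      · exact Or.inr ⟨m, by omega, hcb⟩
      · exact Or.inl ⟨by omega, hr⟩
      · exact Or.inr ⟨i, by omega, hcb⟩
    · rintro (⟨ha', hr⟩ | ⟨i, hi', hcb⟩)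
      · by_cases ham : a = m
        · exact Or.inl (Or.inl ⟨ham, ham ▸ hr⟩)
        · exact Or.inr (Or.inl ⟨by omega, hr⟩)
      · by_cases him : i = m
        · exact Or.inl (Or.inr (him ▸ hcb))
        · exact Or.inr (Or.inr ⟨i, by omega, hcb⟩)

theorem pvInit_eq (T : List (List Bool)) :
    pvInit T = List.replicate T.length (List.replicate T.length false) := by
  rw [pvInit]
  have h : ∀ (n : Nat) (x : List Bool),
      (List.range n).foldl (fun acc _ => acc ++ [x]) [] = List.replicate n x := by
    intro n x
    induction n with
    | zero => simp
    | succ m ih =>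
      rw [List.range_succ, List.foldl_append]
      simp [ih, List.replicate_succ']
  exact h _ _

theorem pvShape_init (T : List (List Bool)) : pvShape T.length (pvInit T) := by
  rw [pvInit_eq]
  refine ⟨by simp, ?_⟩
  intro a ha
  simp [List.getD, List.getElem?_replicate, ha]

theorem pvMget_init (T : List (List Bool)) (a b : Nat) : pvMget (pvInit T) a b = false := by
  rw [pvMget, pvInit_eq]
  by_cases ha : a < T.length
  · simp [List.getD, List.getElem?_replicate, ha]
    by_cases hb : b < T.length <;> simp [hb]
  · simp [List.getD, List.getElem?_replicate, ha]

-- the logic core of B: ∀ a b, P a ∨ Q b  ↔  (∀ a, P a) ∨ (∀ b, Q b)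
theorem pv_forall_or {N : Nat} {P Q : Nat → Prop} :
    (∀ a < N, ∀ b < N, P a ∨ Q b) ↔ (∀ a < N, P a) ∨ (∀ b < N, Q b) := by
  constructor
  · intro h
    by_cases hp : ∀ a < N, P a
    · exact Or.inl hp
    · push_neg at hp
      obtain ⟨a0, ha0, hpa⟩ := hp
      exact Or.inr (fun b hb => ((h a0 ha0 b hb).resolve_left hpa))
  · rintro (h | h) a ha b hb
    · exact Or.inl (h a ha)
    · exact Or.inr (h b hb)

-- ===== VERDICT (by name: the statement is the Claim_ definition above) =====
theorem wszystkie_szachowane_spec : Claim_equal_wszystkie_szachowane := by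
  intro T _ _
  unfold Spec_wszystkie_szachowane
  rw [wszystkie_szachowane, wszystkie_szachowane_alt, Bool.eq_iff_iff]
  simp only [List.all_eq_true, List.any_eq_true, List.mem_range, Bool.or_eq_true]
  have hsz : ∀ a, a < T.length → ∀ b, b < T.length →
      (pvMget (pvMarkI T (pvInit T)) a b = true ↔
        ((∃ j < T.length, (T.getD a []).getD j false = true)
          ∨ (∃ i < T.length, (T.getD i []).getD b false = true))) := by
    intro a ha b hb
    rw [pvMarkI, pvMget_markI_aux (pvShape_init T) ha hb T.length (le_refl _), pvMget_init]
    split_ifs with h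
    · simp only [true_iff]
      rcases h with ⟨_, hr⟩ | hc
      · exact Or.inl hr
      · exact Or.inr hc
    · simp only [Bool.false_eq_true, false_iff]
      intro hcon
      exact h (hcon.elim (fun hr => Or.inl ⟨ha, hr⟩) Or.inr)
  constructor
  · intro h
    exact (pv_forall_or (N := T.length)
      (P := fun a => ∃ j < T.length, (T.getD a []).getD j false = true)
      (Q := fun b => ∃ i < T.length, (T.getD i []).getD b false = true)).mp
      (fun a ha b hb => (hsz a ha b hb).mp (h a ha b hb))
  · intro h a ha b hb
    exact (hsz a ha b hb).mpr ((pv_forall_or (N := T.length)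
      (P := fun a => ∃ j < T.length, (T.getD a []).getD j false = true)
      (Q := fun b => ∃ i < T.length, (T.getD i []).getD b false = true)).mpr h a ha b hb)
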